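-- pv_equiv track=rewrite | github.com/0rakul0/TimesSeriesAgent | eval/modelo_hibrido_eval_ativo.py | detectar_coluna_close
-- ===== SOURCE A (Python) =====
-- def detectar_coluna_close(train_cols):
--     """
--     Identifica automaticamente qual coluna representa o preço de fechamento
--     do ativo (Close_PETR4.SA, Close_PRIO3.SA, Close_BZ=F etc).
--
--     Caso não encontre, tenta fallback para qualquer coluna contendo "Close".
--     """
--     closes = [c for c in train_cols if c.startswith("Close_")]
--     if closes:
--         return closes[0]
--
--     closes = [c for c in train_cols if "Close" in c]
--     if not closes:
--         raise KeyError("Nenhuma coluna Close encontrada no checkpoint.")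
--     return closes[0]
-- ===== SOURCE B (Python) =====
-- def detectar_coluna_close(train_cols):
--     """Single-pass version: one traversal keeping the first 'Close'-containing
--     column as fallback, returning immediately on the first 'Close_' prefix."""
--     first_contains = None
--     for c in train_cols:
--         if c.startswith("Close_"):
--             return c
--         if first_contains is None and "Close" in c:
--             first_contains = c
--     if first_contains is None:
--         raise KeyError("Nenhuma coluna Close encontrada no checkpoint.")
--     return first_contains
-- ===== Notes on version B (the rewrite author's own statement) =====
-- stated objective: alternative
-- what changed: Replaced A's two list-comprehension scans with a single traversal that returns early on the first 'Close_'-prefixed column and carries the first 'Close'-containing column as a fallback.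
import Mathlib
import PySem

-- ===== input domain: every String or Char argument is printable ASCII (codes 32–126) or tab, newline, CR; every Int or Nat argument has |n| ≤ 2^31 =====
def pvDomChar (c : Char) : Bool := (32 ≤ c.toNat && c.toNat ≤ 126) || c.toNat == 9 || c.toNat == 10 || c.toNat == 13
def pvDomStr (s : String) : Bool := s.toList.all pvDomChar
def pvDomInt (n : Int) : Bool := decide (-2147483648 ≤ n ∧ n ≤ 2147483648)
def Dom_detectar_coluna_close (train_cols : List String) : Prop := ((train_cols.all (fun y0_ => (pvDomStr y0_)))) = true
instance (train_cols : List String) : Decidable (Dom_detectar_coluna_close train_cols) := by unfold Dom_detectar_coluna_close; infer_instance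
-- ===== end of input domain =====

-- B replaces A's two filtering passes by one early-exit traversal with a fallback accumulator (objective: alternative).
-- Where Python A raises KeyError (no column containing "Close") B raises the same KeyError; those inputs are outside Pre_.

-- ===== PORT A =====
-- closes = [c for c in train_cols if c.startswith("Close_")]; return closes[0] if nonempty,
-- else the same with "Close" in c; KeyError (excluded by Pre_) gives the dummy "".
def detectar_coluna_close (train_cols : List String) : String :=
  let closes := train_cols.filter (fun c => PySem.Str.startswith c "Close_")
  match closes with
  | c :: _ => c
  | [] =>
    let closes2 := train_cols.filter (fun c => PySem.Str.isIn "Close" c)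
    match closes2 with
    | c :: _ => c
    | [] => ""   -- raise KeyError: outside Pre_

-- ===== PORT B =====
-- the single for-loop of Source B: early return on a "Close_" prefix, first_contains accumulator otherwise
def detectarAltLoop (cols : List String) (first_contains : Option String) : String :=
  match cols with
  | [] =>
    match first_contains with
    | some c => c
    | none => ""   -- raise KeyError: outside Pre_
  | c :: rest =>
    if PySem.Str.startswith c "Close_" then c
    else detectarAltLoop rest
      (if first_contains.isNone && PySem.Str.isIn "Close" c then some c else first_contains)

def detectar_coluna_close_alt (train_cols : List String) : String :=
  detectarAltLoop train_cols none

-- ===== PRECONDITION & SPEC =====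
-- Pre_ excludes exactly the inputs on which Python A raises KeyError: no column contains "Close".
def Pre_detectar_coluna_close (train_cols : List String) : Prop :=
  ∃ c ∈ train_cols, PySem.Str.isIn "Close" c = true
instance (train_cols : List String) : Decidable (Pre_detectar_coluna_close train_cols) := by unfold Pre_detectar_coluna_close; infer_instance
def pvWitness_detectar_coluna_close : List String := ["Open_X", "Close_PETR4.SA"]

def Spec_detectar_coluna_close (train_cols : List String) (out : String) : Prop := out = detectar_coluna_close_alt train_cols
instance (train_cols : List String) (out : String) : Decidable (Spec_detectar_coluna_close train_cols out) := by unfold Spec_detectar_coluna_close; infer_instance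

-- ===== CLAIM (what is proved, stated in full; the proofs are below) =====
def Claim_equal_detectar_coluna_close : Prop := ∀ (train_cols : List String), Dom_detectar_coluna_close train_cols → Pre_detectar_coluna_close train_cols → Spec_detectar_coluna_close train_cols (detectar_coluna_close train_cols)

-- ===== LEMMAS AND PROOFS =====

-- the loop, characterised: first prefix match if any, else the accumulator or-else first contains match, else ""
theorem detectarAltLoop_eq (cols : List String) (fc : Option String) :
    detectarAltLoop cols fc =
      match cols.filter (fun c => PySem.Str.startswith c "Close_") with
      | c :: _ => c
      | [] =>
        match fc.or ((cols.filter (fun c => PySem.Str.isIn "Close" c)).head?) with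
        | some c => c
        | none => "" := by
  induction cols generalizing fc with
  | nil => cases fc <;> simp [detectarAltLoop]
  | cons c rest ih =>
    simp only [detectarAltLoop, List.filter_cons]
    by_cases hp : PySem.Str.startswith c "Close_" = true
    · rw [if_pos hp, if_pos hp]
    · rw [if_neg hp, if_neg hp]
      cases fc with
      | some a =>
        simp only [Option.isNone_some, Bool.false_and]
        rw [ih]
        by_cases hc : PySem.Str.isIn "Close" c = true
        · rw [if_pos hc]
          cases List.filter (fun c => PySem.Str.startswith c "Close_") rest <;> simp [Option.or]
        · rw [if_neg hc]
          cases List.filter (fun c => PySem.Str.startswith c "Close_") rest <;> simp [Option.or]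
      | none =>
        simp only [Option.isNone_none, Bool.true_and]
        rw [ih]
        by_cases hc : PySem.Str.isIn "Close" c = true
        · rw [if_pos hc, if_pos hc]
          cases List.filter (fun c => PySem.Str.startswith c "Close_") rest <;> simp [Option.or]
        · rw [if_neg hc, if_neg hc]

-- ===== VERDICT (by name: the statement is the Claim_ definition above) =====
theorem detectar_coluna_close_spec : Claim_equal_detectar_coluna_close := by
  intro train_cols _ hpre
  unfold Spec_detectar_coluna_close detectar_coluna_close detectar_coluna_close_alt
  rw [detectarAltLoop_eq]
  cases hf : train_cols.filter (fun c => PySem.Str.startswith c "Close_") with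
  | cons c rest => simp
  | nil =>
    simp only [Option.none_or]
    cases hg : train_cols.filter (fun c => PySem.Str.isIn "Close" c) with
    | cons c rest => simp
    | nil =>
      exfalso
      obtain ⟨c, hmem, hc⟩ := hpre
      have hmf : c ∈ train_cols.filter (fun c => PySem.Str.isIn "Close" c) :=
        List.mem_filter.mpr ⟨hmem, hc⟩
      rw [hg] at hmf
      exact absurd hmf (List.not_mem_nil)
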